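-- pv_equiv track=rewrite | github.com/leela/dobble | dobble/utils.py | get_diagonal_shifted_y_matrix_combs
-- ===== SOURCE A (Python) =====
-- def create_matrix(rows, cols, use_num_sequence = False, seq_start_from=None):
--     if not use_num_sequence:
--         return [[None for col in range(cols)] for row in range(rows)]
--     else:
--         seq_start_from = seq_start_from or 0
--         return [[seq_start_from+col+(row*cols) for col in range(cols)] for row in range(rows)]
--
-- def shift_y(matrix, shift_array):
--     """Roll or shift along y-axis based on the column wise shift parameters.
--     For a 3X3 matrix with shift array as [0, 1, 2] will roll the matrix diagonally.
--
--     roll_y([[5, 8, 11], [6, 9, 12], [7, 10, 13]]) => [[5, 9, 13], [6, 10, 11], [7, 8, 12]]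
--
--     NOTE: Works only for NxN matrix.
--     """
--     new = create_matrix(len(matrix), len(matrix))
--     for row in range(len(matrix)):
--         for col in range(len(matrix)):
--             shifted_row = (row + shift_array[col]) % len(matrix)
--             new[row][col] = matrix[shifted_row][col]
--     return new
--
-- def get_diagonal_shifted_y_matrix_combs(matrix):
--     """Get all the combinations(1 time shift, 2 time shift etc) of a diagonally Y-axis shifted square matrix.
--
--     Analogy: Taken we have nXn players and "n players per team". Find team wise players for each game with the given conditions
--     cond1: all teams should participate in each game.
--     cond2: we shuffle teams in such a way that, "no 2 players play together in a team more than
--     once for the whole series of games".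
--
--     Given 9 players numbered 5 to 13, there will be 3 combinations. here is 3X3 combinations with 9 players=>
--     [[5, 8, 11], [6, 9, 12], [7, 10, 13]] & [[5, 9, 13], [6, 10, 11], [7, 8, 12]] & [[5, 10, 12], [6, 8, 13], [7, 9, 11]]
--     (NOTE: Rotation gives correct combinations only when "n in prime" As we use modulo))
--
--     Note: Works only for NxN matrix.
--     """
--     combinations = []
--     shift_array = range(len(matrix))
--
--     comb = matrix
--     for i in range(len(matrix)):
--         combinations.append(comb)
--         comb = shift_y(comb, shift_array)
--     return combinations
-- ===== SOURCE B (Python) =====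
-- def get_diagonal_shifted_y_matrix_combs(matrix):
--     n = len(matrix)
--     return [[[matrix[(row + i * col) % n][col] for col in range(n)]
--              for row in range(n)]
--             for i in range(n)]
-- ===== Notes on version B (the rewrite author's own statement) =====
-- stated objective: faster
-- what changed: Replaces the iterative composition of shift_y (each comb rebuilt from the previous one through an allocate-then-assign scratch matrix) with a single closed-form comprehension indexing the original matrix: comb_i[row][col] = matrix[(row + i*col) % n][col].
-- outside the precondition, e.g. on get_diagonal_shifted_y_matrix_combs([[1, 2]]): A returns [[[1, 2]]], B returns [[[1]]]
import Mathlib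
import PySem

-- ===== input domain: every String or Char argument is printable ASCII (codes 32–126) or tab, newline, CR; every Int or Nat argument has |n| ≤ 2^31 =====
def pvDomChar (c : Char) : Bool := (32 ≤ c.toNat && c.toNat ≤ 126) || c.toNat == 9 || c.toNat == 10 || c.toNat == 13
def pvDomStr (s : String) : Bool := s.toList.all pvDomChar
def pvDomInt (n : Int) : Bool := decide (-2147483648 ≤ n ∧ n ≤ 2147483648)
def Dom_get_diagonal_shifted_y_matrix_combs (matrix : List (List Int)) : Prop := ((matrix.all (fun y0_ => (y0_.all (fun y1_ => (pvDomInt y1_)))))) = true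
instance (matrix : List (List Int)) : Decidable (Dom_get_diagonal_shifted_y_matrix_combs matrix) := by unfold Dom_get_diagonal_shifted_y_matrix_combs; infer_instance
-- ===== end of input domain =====

-- B replaces the iterative composition of shift_y with one closed-form comprehension
-- comb_i[row][col] = matrix[(row + i*col) % n][col] (objective: faster by a constant factor, measured).

-- ===== PORT A =====
-- create_matrix is only called here as create_matrix(n, n) (use_num_sequence=False);
-- its None placeholders are modeled as 0 — under Pre_ every cell is overwritten before being read.
def pvCreateMatrix (rows cols : Int) : List (List Int) :=
  (PySem.List.pyRange 0 rows 1).map (fun _ => (PySem.List.pyRange 0 cols 1).map (fun _ => (0 : Int)))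

def pvShiftY (matrix : List (List Int)) (shiftArray : List Int) : List (List Int) :=
  (PySem.List.pyRange 0 (matrix.length : Int) 1).foldl (fun nw row =>
    (PySem.List.pyRange 0 (matrix.length : Int) 1).foldl (fun nw col =>
      nw.modify row.toNat (fun r =>
        r.set col.toNat
          (PySem.List.pyGetD
            (PySem.List.pyGetD matrix
              (PySem.Int.mod (row + PySem.List.pyGetD shiftArray col 0) (matrix.length : Int)) [])
            col 0))) nw)
    (pvCreateMatrix (matrix.length : Int) (matrix.length : Int))

def get_diagonal_shifted_y_matrix_combs (matrix : List (List Int)) : List (List (List Int)) :=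
  let shiftArray : List Int := PySem.List.pyRange 0 (matrix.length : Int) 1
  ((PySem.List.pyRange 0 (matrix.length : Int) 1).foldl
    (fun (st : List (List (List Int)) × List (List Int)) _ =>
      (st.1 ++ [st.2], pvShiftY st.2 shiftArray)) ([], matrix)).1

-- ===== PORT B =====
def get_diagonal_shifted_y_matrix_combs_alt (matrix : List (List Int)) : List (List (List Int)) :=
  let n : Int := (matrix.length : Int)
  (PySem.List.pyRange 0 n 1).map (fun i =>
    (PySem.List.pyRange 0 n 1).map (fun row =>
      (PySem.List.pyRange 0 n 1).map (fun col =>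
        PySem.List.pyGetD
          (PySem.List.pyGetD matrix (PySem.Int.mod (row + i * col) n) []) col 0)))

-- ===== PRECONDITION & SPEC =====
-- Pre_ excludes non-square inputs: rows shorter than len(matrix) make A raise IndexError,
-- and on rows longer than len(matrix) A's first element accidentally keeps the extra columns
-- (it is the original matrix object) while every later element is truncated to n columns.
def Pre_get_diagonal_shifted_y_matrix_combs (matrix : List (List Int)) : Prop :=
  ∀ r ∈ matrix, r.length = matrix.length
instance (matrix : List (List Int)) : Decidable (Pre_get_diagonal_shifted_y_matrix_combs matrix) := by
  unfold Pre_get_diagonal_shifted_y_matrix_combs; infer_instance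

def pvWitness_get_diagonal_shifted_y_matrix_combs : List (List Int) :=
  [[5, 8, 11], [6, 9, 12], [7, 10, 13]]

def Spec_get_diagonal_shifted_y_matrix_combs (matrix : List (List Int)) (out : List (List (List Int))) : Prop := out = get_diagonal_shifted_y_matrix_combs_alt matrix
instance (matrix : List (List Int)) (out : List (List (List Int))) : Decidable (Spec_get_diagonal_shifted_y_matrix_combs matrix out) := by unfold Spec_get_diagonal_shifted_y_matrix_combs; infer_instance

-- ===== CLAIM (what is proved, stated in full; the proofs are below) =====
def Claim_equal_get_diagonal_shifted_y_matrix_combs : Prop := ∀ (matrix : List (List Int)), Dom_get_diagonal_shifted_y_matrix_combs matrix → Pre_get_diagonal_shifted_y_matrix_combs matrix → Spec_get_diagonal_shifted_y_matrix_combs matrix (get_diagonal_shifted_y_matrix_combs matrix)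

-- ===== LEMMAS AND PROOFS =====


-- one matrix entry, as both ports read it
def pvEntry (m : List (List Int)) (r c : Int) : Int :=
  PySem.List.pyGetD (PySem.List.pyGetD m r []) c 0

-- the closed-form i-th combination, over Nat indices
def pvComb (m : List (List Int)) (i : Nat) : List (List Int) :=
  (List.range m.length).map (fun (row : Nat) => (List.range m.length).map (fun (col : Nat) =>
    pvEntry m (PySem.Int.mod ((row : Int) + (i : Int) * (col : Int)) (m.length : Int)) (col : Int)))

lemma pvB_eq (matrix : List (List Int)) :
    get_diagonal_shifted_y_matrix_combs_alt matrix
      = (List.range matrix.length).map (pvComb matrix) := by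
  unfold get_diagonal_shifted_y_matrix_combs_alt
  simp only [PySem.List.pyRange_zero_natCast, List.map_map]
  apply List.map_congr_left
  intro i _
  simp only [Function.comp_apply]
  unfold pvComb
  apply List.map_congr_left
  intro row _
  simp only [Function.comp_apply]
  apply List.map_congr_left
  intro col _
  simp only [Function.comp_apply, pvEntry]

lemma pv_fill_row (v : Nat → Int) (r : List Int) (n c : Nat) (hc : c ≤ n) (hr : r.length = n) :
    (List.range c).foldl (fun r col => r.set col (v col)) r
      = (List.range c).map v ++ r.drop c := by
  induction c with
  | zero => simp
  | succ c ih =>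
      rw [List.range_succ, List.foldl_append, ih (by omega)]
      simp only [List.foldl_cons, List.foldl_nil]
      rw [List.set_append, if_neg (by simp)]
      have h0 : c - (List.map v (List.range c)).length = 0 := by simp
      rw [h0, List.drop_eq_getElem_cons (by omega : c < r.length), List.set_cons_zero]
      simp

lemma pv_fold_modify (cols : List Nat) (row : Nat) (g : Nat → List Int → List Int)
    (nw : List (List Int)) :
    cols.foldl (fun nw col => nw.modify row (fun r => g col r)) nw
      = nw.modify row (fun r => cols.foldl (fun r col => g col r) r) := by
  induction cols generalizing nw with
  | nil => exact (List.modify_id row nw).symm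
  | cons c t ih =>
      simp only [List.foldl_cons, ih]
      rw [List.modify_modify_eq]
      simp [Function.comp_def]

lemma pv_fill_matrix (w : Nat → Nat → Int) (nw : List (List Int)) (n k : Nat) (hk : k ≤ n)
    (hlen : n ≤ nw.length) (hrows : ∀ r ∈ nw, r.length = n) :
    (List.range k).foldl
      (fun nw row => nw.modify row
        (fun r => (List.range n).foldl (fun r col => r.set col (w row col)) r)) nw
      = (List.range k).map (fun row => (List.range n).map (w row)) ++ nw.drop k := by
  induction k with
  | zero => simp
  | succ k ih =>
      rw [List.range_succ, List.foldl_append, ih (by omega)]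
      simp only [List.foldl_cons, List.foldl_nil]
      have hklen : k < nw.length := by omega
      have hL : k < ((List.range k).map (fun row => (List.range n).map (w row)) ++ nw.drop k).length := by
        simp; omega
      rw [List.modify_eq_take_cons_drop hL]
      have hpre : ((List.range k).map (fun row => (List.range n).map (w row))).length = k := by simp
      have htake : ((List.range k).map (fun row => (List.range n).map (w row)) ++ nw.drop k).take k
          = (List.range k).map (fun row => (List.range n).map (w row)) := by
        exact List.take_left' hpre
      have hget : ((List.range k).map (fun row => (List.range n).map (w row)) ++ nw.drop k)[k] = nw[k] := by
        rw [List.getElem_append_right (by simp)]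
        simp [hpre]
      have hdrop : ((List.range k).map (fun row => (List.range n).map (w row)) ++ nw.drop k).drop (k+1)
          = nw.drop (k+1) := by
        rw [List.drop_append]
        simp [hpre, List.drop_drop]
      rw [htake, hget, hdrop]
      have hrk : nw[k].length = n := hrows _ (List.getElem_mem hklen)
      rw [pv_fill_row (w k) nw[k] n n le_rfl hrk]
      rw [show nw[k].drop n = [] from by rw [← hrk]; exact List.drop_length]
      simp

lemma pv_shiftY_eq (m : List (List Int)) (sa : List Int) :
    pvShiftY m sa
      = (List.range m.length).map (fun (row : Nat) => (List.range m.length).map (fun (col : Nat) =>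
          pvEntry m
            (PySem.Int.mod ((row : Int) + PySem.List.pyGetD sa (col : Int) 0) (m.length : Int))
            (col : Int))) := by
  unfold pvShiftY pvCreateMatrix
  simp only [PySem.List.pyRange_zero_natCast, List.foldl_map, Int.toNat_natCast]
  simp only [pv_fold_modify]
  rw [pv_fill_matrix
        (fun row col => PySem.List.pyGetD
          (PySem.List.pyGetD m
            (PySem.Int.mod ((row : Int) + PySem.List.pyGetD sa (col : Int) 0) (m.length : Int)) [])
          (col : Int) 0)
        _ m.length m.length le_rfl (by simp) (by intro r hr; simp at hr; obtain ⟨a, -, rfl⟩ := hr; simp)]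
  simp [pvEntry]

lemma pv_comb_length (m : List (List Int)) (i : Nat) : (pvComb m i).length = m.length := by
  simp [pvComb]

lemma pv_entry_nat (m : List (List Int)) (hsq : ∀ r ∈ m, r.length = m.length)
    (r c : Nat) (hr : r < m.length) (hc : c < m.length) :
    pvEntry m (r : Int) (c : Int) = m[r][c]'(by rw [hsq m[r] (List.getElem_mem hr)]; exact hc) := by
  unfold pvEntry
  rw [PySem.List.pyGetD_natCast, PySem.List.pyGetD_natCast,
      List.getD_eq_getElem m [] hr,
      List.getD_eq_getElem _ 0 (by rw [hsq m[r] (List.getElem_mem hr)]; exact hc)]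

lemma pv_entry_comb (m : List (List Int)) (i : Nat) (r c : Int)
    (hr0 : 0 ≤ r) (hrn : r < (m.length : Int)) (hc0 : 0 ≤ c) (hcn : c < (m.length : Int)) :
    pvEntry (pvComb m i) r c
      = pvEntry m (PySem.Int.mod (r + (i : Int) * c) (m.length : Int)) c := by
  unfold pvEntry
  rw [show PySem.List.pyGetD (pvComb m i) r [] = (pvComb m i)[r.toNat]'(by
        rw [pv_comb_length]; omega) from
      PySem.List.pyGetD_eq_getElem _ _ hr0 (by rw [pv_comb_length]; exact hrn)]
  unfold pvComb
  simp only [List.getElem_map, List.getElem_range]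
  rw [show PySem.List.pyGetD ((List.range m.length).map (fun (col : Nat) =>
        pvEntry m (PySem.Int.mod ((r.toNat : Int) + (i : Int) * (col : Int)) (m.length : Int)) (col : Int))) c 0
      = _ from PySem.List.pyGetD_eq_getElem _ _ hc0 (by simp; exact hcn)]
  simp only [List.getElem_map, List.getElem_range]
  unfold pvEntry
  rw [Int.toNat_of_nonneg hr0, Int.toNat_of_nonneg hc0]

lemma pv_comb_getElem (m : List (List Int)) (i row col : Nat)
    (hr : row < m.length) (hc : col < m.length) :
    ((pvComb m i)[row]'(by simpa [pvComb] using hr))[col]'(by simpa [pvComb] using hc)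
      = pvEntry m (PySem.Int.mod ((row : Int) + (i : Int) * (col : Int)) (m.length : Int)) (col : Int) := by
  simp [pvComb]

lemma pv_comb_zero (matrix : List (List Int))
    (h : ∀ r ∈ matrix, r.length = matrix.length) :
    pvComb matrix 0 = matrix := by
  apply List.ext_getElem (by simp [pvComb])
  intro row h1 h2
  unfold pvComb
  simp only [List.getElem_map, List.getElem_range]
  have hrow : row < matrix.length := by simpa [pvComb] using h1
  apply List.ext_getElem (by simp [h matrix[row] (List.getElem_mem hrow)])
  intro col hc1 hc2
  simp only [List.getElem_map, List.getElem_range]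
  have hn : (0 : Int) < (matrix.length : Int) := by omega
  have hcol : col < matrix.length := by simpa using hc1
  have hmod : PySem.Int.mod ((row : Int) + ((0 : Nat) : Int) * (col : Int)) (matrix.length : Int)
      = (row : Int) := by
    rw [PySem.Int.mod_eq_emod_of_pos hn]
    simp
    exact Int.emod_eq_of_lt (by positivity) (by exact_mod_cast hrow)
  rw [hmod, pv_entry_nat matrix h row col hrow hcol]

lemma pv_comb_succ (matrix : List (List Int)) (i : Nat) :
    pvShiftY (pvComb matrix i) (PySem.List.pyRange 0 (matrix.length : Int) 1)
      = pvComb matrix (i + 1) := by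
  rw [pv_shiftY_eq, pv_comb_length]
  apply List.ext_getElem (by simp [pvComb])
  intro row h1 h2
  simp only [List.getElem_map, List.getElem_range]
  have hrow : row < matrix.length := by simpa using h1
  have hn : (0 : Int) < (matrix.length : Int) := by omega
  apply List.ext_getElem (by simp [pvComb])
  intro col hc1 hc2
  simp only [List.getElem_map, List.getElem_range]
  have hcol : col < matrix.length := by simpa using hc1
  have hsa : PySem.List.pyGetD (PySem.List.pyRange 0 (matrix.length : Int) 1) (col : Int) 0
      = (col : Int) := by
    rw [PySem.List.pyRange_zero_natCast, PySem.List.pyGetD_natCast,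
        List.getD_eq_getElem _ _ (by simpa using hcol)]
    simp
  rw [hsa]
  have h0 : 0 ≤ PySem.Int.mod ((row : Int) + (col : Int)) (matrix.length : Int) := by
    rw [PySem.Int.mod_eq_emod_of_pos hn]; exact Int.emod_nonneg _ (by omega)
  have hlt : PySem.Int.mod ((row : Int) + (col : Int)) (matrix.length : Int) < (matrix.length : Int) := by
    rw [PySem.Int.mod_eq_emod_of_pos hn]; exact Int.emod_lt_of_pos _ hn
  rw [pv_entry_comb matrix i _ _ h0 hlt (by positivity) (by exact_mod_cast hcol),
      pv_comb_getElem matrix (i+1) row col hrow hcol]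
  congr 1
  rw [PySem.Int.mod_eq_emod_of_pos hn, PySem.Int.mod_eq_emod_of_pos hn,
      PySem.Int.mod_eq_emod_of_pos hn, Int.emod_add_emod]
  congr 1
  push_cast
  ring

lemma pv_loop (matrix : List (List Int)) (l : List Int) (acc : List (List (List Int))) (i : Nat) :
    ((l.foldl (fun (st : List (List (List Int)) × List (List Int)) _ =>
        (st.1 ++ [st.2], pvShiftY st.2 (PySem.List.pyRange 0 (matrix.length : Int) 1)))
        (acc, pvComb matrix i)).1)
      = acc ++ (List.range l.length).map (fun j => pvComb matrix (i + j)) := by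
  induction l generalizing acc i with
  | nil => simp
  | cons x t ih =>
      simp only [List.foldl_cons, pv_comb_succ]
      rw [ih]
      simp [List.range_succ_eq_map, List.map_map, Function.comp_def, Nat.add_assoc, Nat.add_comm 1]

-- ===== VERDICT (by name: the statement is the Claim_ definition above) =====
theorem get_diagonal_shifted_y_matrix_combs_spec : Claim_equal_get_diagonal_shifted_y_matrix_combs := by
  intro matrix _ hpre
  unfold Spec_get_diagonal_shifted_y_matrix_combs
  rw [pvB_eq]
  have h := pv_loop matrix (PySem.List.pyRange 0 (matrix.length : Int) 1) [] 0
  rw [pv_comb_zero matrix hpre] at h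
  simp only [get_diagonal_shifted_y_matrix_combs]
  rw [h]
  simp [PySem.List.length_pyRange_one]
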